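-- pv_equiv track=rewrite | github.com/Nostoi/rom24-quickmud-python | mud/utils/string_editor.py | string_linedel
-- ===== SOURCE A (Python) =====
-- def string_linedel(string: str, line: int) -> str:
--     """Remove the 1-indexed line N from the string.
--
--     Mirrors ROM ``string_linedel`` (src/string.c:574-605). Removes the
--     line at position *line* (1-indexed). Out-of-range line numbers are
--     a no-op. Line endings (``\n\r``) are preserved throughout.
--
--     Used by ``.ld`` dot-command.
--     """
--
--     if line < 1:
--         return string
--
--     buf: list[str] = []
--     cnt = 1
--     i = 0
--
--     while i < len(string):
--         c = string[i]
--
--         if cnt != line: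
--             buf.append(c)
--
--         if c == "\n":
--             if i + 1 < len(string) and string[i + 1] == "\r":
--                 if cnt != line:
--                     buf.append(string[i + 1])
--                 i += 1
--             cnt += 1
--
--         i += 1
--
--     return "".join(buf)
-- ===== SOURCE B (Python) =====
-- def _split_lines(string):
--     """Split into line segments; '\n' (with a following '\r' attached) ends a segment."""
--     segs = []
--     cur = []
--     i = 0
--     while i < len(string):
--         c = string[i]
--         cur.append(c)
--         if c == "\n":
--             if i + 1 < len(string) and string[i + 1] == "\r":
--                 cur.append("\r")
--                 i += 1
--             segs.append("".join(cur))
--             cur = []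
--         i += 1
--     if cur:
--         segs.append("".join(cur))
--     return segs
--
--
-- def string_linedel(string: str, line: int) -> str:
--     if line < 1:
--         return string
--     out = []
--     idx = 1
--     for seg in _split_lines(string):
--         if idx != line:
--             out.append(seg)
--         idx += 1
--     return "".join(out)
-- ===== Notes on version B (the rewrite author's own statement) =====
-- stated objective: simpler
-- what changed: A interleaves line counting with per-character copying in one stateful scan; B first splits the string into line segments (attaching a '\r' that follows '\n') and then rejoins every segment whose 1-based index differs from `line`.
import Mathlib
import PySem

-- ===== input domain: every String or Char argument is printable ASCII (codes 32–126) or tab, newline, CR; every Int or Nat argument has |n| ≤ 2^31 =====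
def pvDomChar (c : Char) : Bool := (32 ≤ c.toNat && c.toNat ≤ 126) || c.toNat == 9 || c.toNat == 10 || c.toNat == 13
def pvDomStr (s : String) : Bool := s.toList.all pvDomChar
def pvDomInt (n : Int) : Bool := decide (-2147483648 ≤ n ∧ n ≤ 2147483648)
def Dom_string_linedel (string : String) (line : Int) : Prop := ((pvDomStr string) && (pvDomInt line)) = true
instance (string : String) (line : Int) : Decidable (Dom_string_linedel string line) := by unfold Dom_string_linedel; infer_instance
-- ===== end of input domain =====

-- B replaces A's single stateful scan (line counter interleaved with per-character
-- copying) by split-into-line-segments followed by rejoining all segments whose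
-- 1-based index differs from `line`; objective: simpler decomposition, same cost.

-- ===== PORT A =====
-- A's while loop over index i, with the i+1 lookahead for '\r' after '\n',
-- becomes structural recursion on the remaining character list (the lookahead
-- is the head of the tail); buf/cnt are carried exactly as in A.
def pvGoA (line : Int) : List Char → Int → List Char → List Char
  | [], _, buf => buf
  | '\n' :: '\r' :: r2, cnt, buf =>
      pvGoA line r2 (cnt + 1) (if cnt ≠ line then buf ++ ['\n', '\r'] else buf)
  | '\n' :: rest, cnt, buf =>
      pvGoA line rest (cnt + 1) (if cnt ≠ line then buf ++ ['\n'] else buf)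
  | c :: rest, cnt, buf =>
      pvGoA line rest cnt (if cnt ≠ line then buf ++ [c] else buf)

def string_linedel (string : String) (line : Int) : String :=
  if line < 1 then string
  else String.mk (pvGoA line string.toList 1 [])

-- ===== PORT B =====
-- Source B's _split_lines: accumulate the current segment `cur`; '\n' (with a
-- following '\r' attached) closes it; a final nonempty `cur` is the last segment.
def pvSplitLines : List Char → List Char → List (List Char)
  | [], cur => if cur = [] then [] else [cur]
  | '\n' :: '\r' :: r2, cur => (cur ++ ['\n', '\r']) :: pvSplitLines r2 []
  | '\n' :: rest, cur => (cur ++ ['\n']) :: pvSplitLines rest []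
  | c :: rest, cur => pvSplitLines rest (cur ++ [c])

-- Source B's rejoin loop: keep every segment whose 1-based index differs from `line`.
def pvKeep (line : Int) : List (List Char) → Int → List Char
  | [], _ => []
  | s :: rest, idx => (if idx ≠ line then s else []) ++ pvKeep line rest (idx + 1)

def string_linedel_alt (string : String) (line : Int) : String :=
  if line < 1 then string
  else String.mk (pvKeep line (pvSplitLines string.toList []) 1)

-- ===== PRECONDITION & SPEC =====
def Spec_string_linedel (string : String) (line : Int) (out : String) : Prop := out = string_linedel_alt string line
instance (string : String) (line : Int) (out : String) : Decidable (Spec_string_linedel string line out) := by unfold Spec_string_linedel; infer_instance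

-- ===== CLAIM (what is proved, stated in full; the proofs are below) =====
def Claim_equal_string_linedel : Prop := ∀ (string : String) (line : Int), Dom_string_linedel string line → Spec_string_linedel string line (string_linedel string line)

-- ===== LEMMAS AND PROOFS =====

-- Loop invariant: A's buffer always equals the already-kept output `buf` plus the
-- current (still-open) segment `cur` when the current line is being kept.
theorem pvGoA_eq_keep (line : Int) :
    ∀ (cs cur : List Char) (cnt : Int) (buf : List Char),
      pvGoA line cs cnt (buf ++ (if cnt ≠ line then cur else [])) =
        buf ++ pvKeep line (pvSplitLines cs cur) cnt := by
  intro cs cur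
  induction cs, cur using pvSplitLines.induct with
  | case1 =>
      intro cnt buf
      simp [pvGoA, pvSplitLines, pvKeep]
  | case2 cur hcur =>
      intro cnt buf
      simp [pvGoA, pvSplitLines, pvKeep, hcur]
  | case3 r2 cur ih =>
      intro cnt buf
      have h2 := ih (cnt + 1) (buf ++ (if cnt ≠ line then cur ++ ['\n', '\r'] else []))
      simp only [pvGoA, pvSplitLines, pvKeep]
      split <;> simp_all [List.append_assoc]
  | case4 rest cur h1 ih =>
      intro cnt buf
      have h2 := ih (cnt + 1) (buf ++ (if cnt ≠ line then cur ++ ['\n'] else []))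
      rw [pvGoA.eq_3 line cnt _ rest h1, pvSplitLines.eq_3 cur rest h1]
      simp only [pvKeep]
      split <;> simp_all [List.append_assoc]
  | case5 c rest cur h1 hc ih =>
      intro cnt buf
      have h3 := ih cnt buf
      rw [pvGoA.eq_4 line cnt _ c rest h1 hc, pvSplitLines.eq_4 cur c rest h1 hc]
      split <;> simp_all [List.append_assoc]

-- ===== VERDICT (by name: the statement is the Claim_ definition above) =====
theorem string_linedel_spec : Claim_equal_string_linedel := by
  intro s line _
  unfold Spec_string_linedel string_linedel string_linedel_alt
  split
  · rfl
  · have h := pvGoA_eq_keep line s.toList [] 1 []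
    simp at h
    rw [h]
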